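-- pv_equiv track=rewrite | github.com/utk09/open-appacademy-io | 1_IntroToProgramming/6_Advanced_Problems/18_double_letter_count.py | double_letter_count
-- ===== SOURCE A (Python) =====
-- def double_letter_count(string):
--     new_str = string.split(" ")
--     count = 0
--     for each_word in new_str:
--         for i in range(len(each_word) - 1):
--             if each_word[i] == each_word[i + 1]:
--                 count += 1
--     return count
-- ===== SOURCE B (Python) =====
-- def double_letter_count(string):
--     count = 0
--     for a, b in zip(string, string[1:]):
--         if a == b and a != ' ':
--             count += 1
--     return count
-- ===== Notes on version B (the rewrite author's own statement) =====
-- stated objective: simpler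
-- what changed: Replaces split-into-words plus a nested index loop with one flat pass over adjacent character pairs of the whole string, counting equal pairs whose character is not the space separator.
import Mathlib
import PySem

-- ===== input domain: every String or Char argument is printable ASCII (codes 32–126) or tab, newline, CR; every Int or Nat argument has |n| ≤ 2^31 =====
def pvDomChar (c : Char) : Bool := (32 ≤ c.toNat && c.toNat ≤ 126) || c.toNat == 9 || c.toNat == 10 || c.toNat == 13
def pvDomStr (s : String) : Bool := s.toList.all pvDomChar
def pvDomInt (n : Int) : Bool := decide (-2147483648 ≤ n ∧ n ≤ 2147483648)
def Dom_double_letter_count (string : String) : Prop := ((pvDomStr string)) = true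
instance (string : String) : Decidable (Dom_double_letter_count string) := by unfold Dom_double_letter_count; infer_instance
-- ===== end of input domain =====

-- B replaces A's split-into-words + nested index loop by one flat pass over adjacent
-- character pairs, counting equal pairs whose character is not the space separator.


-- ===== PORT A =====
-- A: words = string.split(" "); for each word, for i in range(len(word)-1): count += (word[i] == word[i+1])
def double_letter_count (string : String) : Int :=
  let new_str := PySem.Chars.splitOn string.toList [' ']
  new_str.foldl
    (fun count each_word =>
      (PySem.List.pyRange 0 ((each_word.length : Int) - 1) 1).foldl
        (fun count i =>
          if PySem.List.pyGet? each_word i = PySem.List.pyGet? each_word (i + 1) then count + 1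
          else count)
        count)
    0

-- ===== PORT B =====
-- B: one flat pass: for (a, b) in zip(string, string[1:]): count += (a == b and a != ' ')
def double_letter_count_alt (string : String) : Int :=
  let l := string.toList
  (l.zip (PySem.List.slice l (some 1) none)).foldl
    (fun count p => if (p.1 == p.2 && p.1 != ' ') = true then count + 1 else count) 0

-- ===== PRECONDITION & SPEC =====
def Spec_double_letter_count (string : String) (out : Int) : Prop := out = double_letter_count_alt string
instance (string : String) (out : Int) : Decidable (Spec_double_letter_count string out) := by unfold Spec_double_letter_count; infer_instance

-- ===== CLAIM (what is proved, stated in full; the proofs are below) =====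
def Claim_equal_double_letter_count : Prop := ∀ (string : String), Dom_double_letter_count string → Spec_double_letter_count string (double_letter_count string)

-- ===== LEMMAS AND PROOFS =====
def pvPairs (w : List Char) : Int := ((w.zip w.tail).countP (fun p => p.1 == p.2) : Int)

theorem pv_inner_list : ∀ (w : List Char) (c : Int),
    (List.range (w.length - 1)).foldl
      (fun c (k : Nat) => if PySem.List.pyGet? w ((k : Nat) : Int) = PySem.List.pyGet? w (((k : Nat) : Int) + 1) then c + 1
                  else c) c
    = c + pvPairs w
  | [], c => by simp [pvPairs]
  | [a], c => by simp [pvPairs]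
  | a :: b :: t, c => by
    have ih := pv_inner_list (b :: t)
    simp only [List.length_cons, Nat.add_sub_cancel, List.range_succ_eq_map, List.foldl_cons,
      List.foldl_map] at *
    simp only [show ∀ (y : Nat), ((y.succ : Int)) = (y : Int) + 1 from fun y => by push_cast; ring,
      PySem.List.pyGet?_cons_succ, Nat.cast_zero, PySem.List.pyGet?_zero_cons,
      zero_add] at *
    have h2 : PySem.List.pyGet? (a :: b :: t) 1 = some b := by
      have h := PySem.List.pyGet?_cons_succ a (b :: t) 0
      rw [show ((0:Nat):Int) + 1 = 1 from by norm_num] at h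
      rw [h, show ((0:Nat):Int) = 0 from rfl, PySem.List.pyGet?_zero_cons]
    rw [h2]
    simp only [show ∀ (y:Nat), ((y:Int) + 1 + 1) = ((y+1 : Nat) : Int) + 1 from by intro y; push_cast; ring,
      PySem.List.pyGet?_cons_succ] at *
    simp only [show ∀ (y:Nat), ((y+1 : Nat) : Int) = (y:Int)+1 from by intro y; push_cast; ring,
      PySem.List.pyGet?_cons_succ]
    rw [ih]
    simp only [pvPairs, List.tail_cons, List.zip_cons_cons, List.countP_cons]
    by_cases hab : a = b
    · simp [hab]
      ring
    · simp [hab]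

theorem pv_go_spec (c : Char) : ∀ (fuel : Nat) (l cur : List Char) (acc : List (List Char)),
    l.length < fuel →
    PySem.Chars.splitOn.go [c] fuel l cur acc
      = acc.reverse ++ (List.modifyHead (cur.reverse ++ ·) (l.splitOnP (· == c)))
  | 0, l, cur, acc => by intro h; omega
  | fuel + 1, [], cur, acc => by
    intro _
    simp [PySem.Chars.splitOn.go, List.splitOnP_nil]
  | fuel + 1, ch :: rest, cur, acc => by
    intro h
    have ih := pv_go_spec c fuel
    simp only [PySem.Chars.splitOn.go, List.isPrefixOf, Bool.and_true, List.splitOnP_cons]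
    by_cases hc : c = ch
    · subst hc
      simp only [beq_self_eq_true, if_pos, List.length_cons, List.length_nil, zero_add,
        List.drop_one, List.tail_cons]
      rw [ih rest [] (cur.reverse :: acc) (by simpa using Nat.lt_of_succ_lt_succ h)]
      obtain ⟨w, ws, hw⟩ := List.exists_cons_of_ne_nil (List.splitOnP_ne_nil (· == c) rest)
      simp [hw]
    · have hb : (c == ch) = false := by simpa using hc
      have hb2 : (ch == c) = false := by simpa using (Ne.symm hc)
      simp only [hb, hb2, Bool.false_eq_true, if_false]
      rw [ih rest (ch :: cur) acc (by simpa using Nat.lt_of_succ_lt_succ h)]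
      obtain ⟨w, ws, hw⟩ := List.exists_cons_of_ne_nil (List.splitOnP_ne_nil (· == c) rest)
      simp [hw]

def pvPairsB (l : List Char) : Int := ((l.zip l.tail).countP (fun p => p.1 == p.2 && p.1 != ' ') : Int)

theorem pv_splitOn_eq (s : List Char) (c : Char) : PySem.Chars.splitOn s [c] = s.splitOn c := by
  rw [show PySem.Chars.splitOn s [c] = PySem.Chars.splitOn.go [c] (s.length + 1) s [] [] from rfl]
  rw [pv_go_spec c (s.length + 1) s [] [] (by omega)]
  obtain ⟨w, ws, hw⟩ := List.exists_cons_of_ne_nil (List.splitOnP_ne_nil (· == c) s)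
  simp [List.splitOn, hw]

theorem pv_split_sum (l : List Char) :
    ((List.splitOnP (· == ' ') l).map pvPairs).sum = pvPairsB l ∧
    ((List.splitOnP (· == ' ') l).headI).head? = l.head?.filter (fun d => d != ' ') := by
  induction l with
  | nil => simp [List.splitOnP_nil, pvPairs, pvPairsB]
  | cons d l ih =>
    obtain ⟨ih1, ih2⟩ := ih
    obtain ⟨w, ws, hw⟩ := List.exists_cons_of_ne_nil (List.splitOnP_ne_nil (· == ' ') l)
    by_cases hd : d = ' '
    · subst hd
      simp only [List.splitOnP_cons, beq_self_eq_true, if_pos, List.map_cons, List.sum_cons]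
      constructor
      · rw [show pvPairs [] = 0 from rfl, zero_add, ih1]
        cases l with
        | nil => rfl
        | cons e l' => simp [pvPairsB]
      · simp [Option.filter_some]
    · have hb : (d == ' ') = false := by simpa using hd
      simp only [List.splitOnP_cons, hb, Bool.false_eq_true, if_false, hw,
        List.modifyHead_cons, List.map_cons, List.sum_cons]
      rw [hw] at ih1 ih2
      simp only [List.headI_cons] at ih2
      simp only [List.map_cons, List.sum_cons] at ih1
      have hext : pvPairs (d :: w) = (if w.head? = some d then 1 else 0) + pvPairs w := by
        cases w with
        | nil => simp [pvPairs]
        | cons w0 w' =>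
          simp only [pvPairs, List.tail_cons, List.zip_cons_cons, List.countP_cons,
            List.head?_cons, Option.some_inj]
          by_cases h0 : w0 = d
          · simp [h0]; ring
          · simp [h0, Ne.symm h0]
      have hextB : pvPairsB (d :: l) = (if l.head? = some d then 1 else 0) + pvPairsB l := by
        cases l with
        | nil => simp [pvPairsB]
        | cons e l' =>
          simp only [pvPairsB, List.tail_cons, List.zip_cons_cons, List.countP_cons,
            List.head?_cons, Option.some_inj]
          by_cases h0 : e = d
          · subst h0; simp only [beq_self_eq_true, Bool.true_and, if_pos,
              show (e != ' ') = true by simpa using hd]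
            omega
          · simp [h0, Ne.symm h0]
      constructor
      · rw [hext, hextB, add_assoc, ih1]
        have hsame : (w.head? = some d) ↔ (l.head? = some d) := by
          rw [ih2]
          cases hl : l.head? with
          | none => simp
          | some e =>
            simp only [Option.filter_some]
            by_cases he : e = ' '
            · subst he
              simp only [bne_self_eq_false, Bool.false_eq_true, if_false]
              constructor
              · intro h; cases h
              · intro h; rw [Option.some_inj] at h; exact absurd h.symm hd
            · simp [show (e != ' ') = true by simpa using he]
        by_cases hcase : l.head? = some d
        · simp [hcase, hsame.mpr hcase]
        · have : ¬ w.head? = some d := fun h => hcase (hsame.mp h)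
          simp [hcase, this]
      · simp only [List.headI_cons, List.head?_cons,
          Option.filter_some]
        rw [if_pos (by simpa using hd)]

-- main glue: A's value equals B's value on every string
theorem pv_main (string : String) : double_letter_count string = double_letter_count_alt string := by
  unfold double_letter_count double_letter_count_alt
  rw [pv_splitOn_eq string.toList ' ']
  have hword : ∀ (w : List Char) (c : Int),
      (PySem.List.pyRange 0 ((w.length : Int) - 1) 1).foldl
        (fun count i =>
          if PySem.List.pyGet? w i = PySem.List.pyGet? w (i + 1) then count + 1 else count) c
      = c + pvPairs w := by
    intro w c
    rw [PySem.List.pyRange_one]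
    rw [List.foldl_map]
    have h0 : ((w.length : Int) - 1 - 0).toNat = w.length - 1 := by omega
    rw [h0]
    simpa using pv_inner_list w c
  have hfun : (fun (count : Int) (each_word : List Char) =>
      (PySem.List.pyRange 0 ((each_word.length : Int) - 1) 1).foldl
        (fun count i =>
          if PySem.List.pyGet? each_word i = PySem.List.pyGet? each_word (i + 1) then count + 1
          else count) count)
      = fun (count : Int) (each_word : List Char) => count + pvPairs each_word := by
    funext c w; exact hword w c
  rw [hfun, PySem.List.foldl_add, zero_add]
  rw [show string.toList.splitOn ' ' = List.splitOnP (· == ' ') string.toList from rfl]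
  rw [(pv_split_sum string.toList).1]
  show pvPairsB string.toList
      = (string.toList.zip (PySem.List.slice string.toList (some 1) none)).foldl
          (fun count p => if (p.1 == p.2 && p.1 != ' ') = true then count + 1 else count) 0
  rw [PySem.List.slice_from string.toList (by norm_num), show ((1 : Int)).toNat = 1 from rfl,
    List.drop_one, PySem.List.foldl_count_if, zero_add]
  rfl

-- ===== VERDICT (by name: the statement is the Claim_ definition above) =====
theorem double_letter_count_spec : Claim_equal_double_letter_count := by
  intro string _
  unfold Spec_double_letter_count
  exact pv_main string
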